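-- pv_equiv track=rewrite | github.com/Ozairfzn/Okayy | OC Informatique/Binaire/Activités.py | ET
-- ===== SOURCE A (Python) =====
-- def ajouter_zeros(liste, p):
--     while len(liste) != p:
--         liste.insert(0, 0)
--     return liste
--
-- def ET(liste1, liste2):
--     if len(liste1) > len(liste2):
--         liste2 = ajouter_zeros(liste2, len(liste1))
--     elif len(liste1) < len(liste2):
--         liste1 = ajouter_zeros(liste1, len(liste2))
--     for i in range(len(liste1)):
--         if liste1[i] == 1 and liste2[i] == 1:
--             liste1[i] = 1
--         else:
--             liste1[i] = 0
--     return liste1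
-- ===== SOURCE B (Python) =====
-- def ET(liste1, liste2):
--     i, j = len(liste1), len(liste2)
--     out = []
--     while i > 0 or j > 0:
--         a = liste1[i - 1] if i > 0 else 0
--         b = liste2[j - 1] if j > 0 else 0
--         out.append(1 if a == 1 and b == 1 else 0)
--         i -= 1
--         j -= 1
--     out.reverse()
--     return out
-- ===== Notes on version B (the rewrite author's own statement) =====
-- stated objective: alternative
-- what changed: B drops A's pad-then-overwrite two-phase approach: a single right-aligned pass walks both lists from their last elements with two index cursors, treating a missing element as 0, and reverses the freshly built result; no padding helper and no mutation of the arguments (A mutates its inputs in place; the equivalence is about the return value only).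
import Mathlib
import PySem

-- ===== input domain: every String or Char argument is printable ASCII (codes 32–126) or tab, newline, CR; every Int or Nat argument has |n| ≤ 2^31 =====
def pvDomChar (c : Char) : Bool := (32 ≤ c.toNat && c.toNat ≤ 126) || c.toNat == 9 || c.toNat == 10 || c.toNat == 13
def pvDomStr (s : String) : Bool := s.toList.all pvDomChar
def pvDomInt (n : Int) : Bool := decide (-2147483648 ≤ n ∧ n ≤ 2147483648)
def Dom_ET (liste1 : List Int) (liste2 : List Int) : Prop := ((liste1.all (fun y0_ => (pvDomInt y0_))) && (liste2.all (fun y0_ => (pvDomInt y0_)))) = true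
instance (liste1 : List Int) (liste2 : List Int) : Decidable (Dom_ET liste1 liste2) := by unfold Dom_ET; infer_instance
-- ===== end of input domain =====

-- B replaces A's in-place pad-then-overwrite two phases by one right-aligned index walk from
-- the tails of both lists (missing element = 0), then a reverse (objective: alternative).
-- A mutates its argument lists in place; B does not — the equivalence proved here is about
-- the RETURN value only.


-- ===== PORT A =====
-- 'while len(liste) != p: liste.insert(0, 0)' — A only reaches it with len(liste) < p,
-- where the loop condition is equivalent to len(liste) < p (the guard also makes it total).
def ajouterZeros (liste : List Int) (p : Nat) : List Int :=
  if liste.length < p then ajouterZeros (0 :: liste) p else liste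
termination_by p - liste.length

-- the for-loop 'liste1[i] = 1 if liste1[i]==1 and liste2[i]==1 else 0' over the two
-- equal-length lists, written as the element-wise recursion over the same pairs
def etLoopA : List Int → List Int → List Int
  | a :: t1, b :: t2 => (if a = 1 ∧ b = 1 then (1 : Int) else 0) :: etLoopA t1 t2
  | _, _ => []

def ET (liste1 : List Int) (liste2 : List Int) : List Int :=
  if liste1.length > liste2.length then
    etLoopA liste1 (ajouterZeros liste2 liste1.length)
  else if liste1.length < liste2.length then
    etLoopA (ajouterZeros liste1 liste2.length) liste2
  else
    etLoopA liste1 liste2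

-- ===== PORT B =====
-- B's 'while i > 0 or j > 0' loop; i, j start as the lengths and only l[i-1] under 'i > 0'
-- is ever read, so the cursors are carried as Nat (Python's i may run negative, unread).
def etLoopB (l1 l2 : List Int) (i j : Nat) (out : List Int) : List Int :=
  if 0 < i ∨ 0 < j then
    let a := if 0 < i then l1.getD (i - 1) 0 else 0   -- liste1[i-1] if i > 0 else 0 (index in range)
    let b := if 0 < j then l2.getD (j - 1) 0 else 0
    etLoopB l1 l2 (i - 1) (j - 1) (out ++ [if a = 1 ∧ b = 1 then (1 : Int) else 0])
  else out
termination_by i + j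
decreasing_by omega

def ET_alt (liste1 : List Int) (liste2 : List Int) : List Int :=
  (etLoopB liste1 liste2 liste1.length liste2.length []).reverse

-- ===== PRECONDITION & SPEC =====
def Spec_ET (liste1 : List Int) (liste2 : List Int) (out : List Int) : Prop := out = ET_alt liste1 liste2
instance (liste1 : List Int) (liste2 : List Int) (out : List Int) : Decidable (Spec_ET liste1 liste2 out) := by unfold Spec_ET; infer_instance

-- ===== CLAIM (what is proved, stated in full; the proofs are below) =====
def Claim_equal_ET : Prop := ∀ (liste1 : List Int) (liste2 : List Int), Dom_ET liste1 liste2 → Spec_ET liste1 liste2 (ET liste1 liste2)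

-- ===== LEMMAS AND PROOFS =====
def etF (a b : Int) : Int := if a = 1 ∧ b = 1 then 1 else 0

-- proof-only recursive description of one right-aligned pass over two reversed lists
def etGo : List Int → List Int → List Int
  | [], [] => []
  | [], b :: t2 => etF 0 b :: etGo [] t2
  | a :: t1, [] => etF a 0 :: etGo t1 []
  | a :: t1, b :: t2 => etF a b :: etGo t1 t2

theorem etLoopA_eq_zipWith (l1 l2 : List Int) :
    etLoopA l1 l2 = List.zipWith etF l1 l2 := by
  induction l1 generalizing l2 with
  | nil => cases l2 <;> simp [etLoopA]
  | cons a t ih => cases l2 <;> simp [etLoopA, etF, ih]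

theorem ajouterZeros_eq (liste : List Int) (p : Nat) :
    ajouterZeros liste p = List.replicate (p - liste.length) 0 ++ liste := by
  fun_induction ajouterZeros liste p with
  | case1 l h ih =>
    rw [ih]
    have h1 : p - l.length = (p - (l.length + 1)) + 1 := by omega
    simp only [List.length_cons] at *
    rw [h1, List.replicate_succ', List.append_assoc]
    rfl
  | case2 l h =>
    have : p - l.length = 0 := by omega
    simp [this]

theorem etGo_eq_zipWith (r1 r2 : List Int) :
    etGo r1 r2 = List.zipWith etF
      (r1 ++ List.replicate (r2.length - r1.length) 0)
      (r2 ++ List.replicate (r1.length - r2.length) 0) := by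
  induction r1, r2 using etGo.induct with
  | case1 => simp [etGo]
  | case2 b t2 ih => simp [etGo, List.replicate_succ, ih]
  | case3 a t1 ih => simp [etGo, List.replicate_succ, ih]
  | case4 a t1 b t2 ih => simp [etGo, Nat.succ_sub_succ, ih]

theorem take_reverse_head (l : List Int) (i : Nat) (h0 : 0 < i) (hle : i ≤ l.length) :
    (l.take i).reverse = l.getD (i - 1) 0 :: (l.take (i - 1)).reverse := by
  have h1 : i - 1 < l.length := by omega
  have h2 : i = (i - 1) + 1 := by omega
  rw [h2, List.take_add_one, List.getElem?_eq_getElem (by omega)]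
  simp [List.getD, List.getElem?_eq_getElem h1]

theorem etLoopB_eq_etGo (l1 l2 : List Int) (i j : Nat) (out : List Int)
    (hi : i ≤ l1.length) (hj : j ≤ l2.length) :
    etLoopB l1 l2 i j out = out ++ etGo ((l1.take i).reverse) ((l2.take j).reverse) := by
  fun_induction etLoopB l1 l2 i j out with
  | case1 i j out h a b ih =>
    simp only [dite_eq_ite] at ih
    rw [ih (by omega) (by omega), List.append_assoc, List.singleton_append]
    rcases Nat.eq_zero_or_pos i with hi0 | hip <;>
      rcases Nat.eq_zero_or_pos j with hj0 | hjp
    · omega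
    · subst hi0
      rw [take_reverse_head l2 j hjp hj]
      simp [etGo, etF, a]
    · subst hj0
      rw [take_reverse_head l1 i hip hi]
      simp [etGo, etF, b]
    · rw [take_reverse_head l1 i hip hi, take_reverse_head l2 j hjp hj]
      simp [etGo, etF, a, b, hip, hjp, List.getD]
  | case2 i j out h =>
    have : i = 0 ∧ j = 0 := by omega
    simp [this.1, this.2, etGo]

theorem ET_eq_zipWith (l1 l2 : List Int) :
    ET l1 l2 = List.zipWith etF
      (List.replicate (l2.length - l1.length) 0 ++ l1)
      (List.replicate (l1.length - l2.length) 0 ++ l2) := by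
  unfold ET
  split_ifs with h1 h2
  · have e2 : l2.length - l1.length = 0 := by omega
    rw [ajouterZeros_eq, etLoopA_eq_zipWith, e2]
    simp
  · have e1 : l1.length - l2.length = 0 := by omega
    rw [ajouterZeros_eq, etLoopA_eq_zipWith, e1]
    simp
  · have e1 : l1.length - l2.length = 0 := by omega
    have e2 : l2.length - l1.length = 0 := by omega
    rw [etLoopA_eq_zipWith, e1, e2]
    simp

theorem ET_alt_eq_zipWith (l1 l2 : List Int) :
    ET_alt l1 l2 = List.zipWith etF
      (List.replicate (l2.length - l1.length) 0 ++ l1)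
      (List.replicate (l1.length - l2.length) 0 ++ l2) := by
  unfold ET_alt
  rw [etLoopB_eq_etGo l1 l2 l1.length l2.length [] le_rfl le_rfl]
  rw [List.take_length, List.take_length, List.nil_append, etGo_eq_zipWith]
  rw [List.reverse_zipWith (by simp; omega)]
  simp

-- ===== VERDICT (by name: the statement is the Claim_ definition above) =====
theorem ET_spec : Claim_equal_ET := by
  intro l1 l2 _
  unfold Spec_ET
  rw [ET_eq_zipWith, ET_alt_eq_zipWith]
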